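-- pv_equiv track=rewrite | github.com/ceucomputing/automarker | gui.py | _len_cell
-- ===== SOURCE A (Python) =====
-- def _len_cell(cell):
--     """Return the width of the cell
--
--     Special characters are taken into account to return the width of the
--     cell, such like newlines and tabs
--     """
--
--     cell_lines = cell.split('\n')
--     maxi = 0
--     for line in cell_lines:
--         length = 0
--         parts = line.split('\t')
--         for part, i in zip(parts, list(range(1, len(parts) + 1))):
--             length = length + len(part)
--             if i < len(parts):
--                 length = (length//8 + 1) * 8
--         maxi = max(maxi, length)
--     return maxi
-- ===== SOURCE B (Python) =====
-- def _len_cell(cell):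
--     """Return the width of the cell (single character-by-character scan)."""
--     maxi = 0
--     col = 0
--     for ch in cell:
--         if ch == '\n':
--             if col > maxi:
--                 maxi = col
--             col = 0
--         elif ch == '\t':
--             col = (col // 8 + 1) * 8
--         else:
--             col += 1
--     return max(maxi, col)
-- ===== Notes on version B (the rewrite author's own statement) =====
-- stated objective: simpler
-- what changed: Replaced the split-by-newline then split-by-tab nested loops (with zip-index bookkeeping) by a single character-by-character scan maintaining the current column and the running maximum.
import Mathlib
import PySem

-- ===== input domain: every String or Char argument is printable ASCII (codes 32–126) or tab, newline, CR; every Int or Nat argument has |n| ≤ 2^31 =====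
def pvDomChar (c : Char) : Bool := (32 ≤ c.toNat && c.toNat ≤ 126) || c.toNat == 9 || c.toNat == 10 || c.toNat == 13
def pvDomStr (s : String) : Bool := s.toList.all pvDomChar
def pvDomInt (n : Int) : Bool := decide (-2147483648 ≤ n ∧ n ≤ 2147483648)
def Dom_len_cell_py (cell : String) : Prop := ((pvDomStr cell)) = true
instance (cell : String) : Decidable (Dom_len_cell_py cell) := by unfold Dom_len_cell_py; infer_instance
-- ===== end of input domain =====

-- B replaces A's nested split('\n')/split('\t') loops by a single stateful scan over the characters (simpler decomposition, same cost).

-- ===== PORT A =====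
-- transliteration of A: split by '\n'; per line split by '\t', zip the parts with their 1-based
-- indices, add each part's length and round up to the next tab stop except after the last part;
-- keep the running max over lines
def len_cell_py (cell : String) : Int :=
  let cell_lines := PySem.Chars.splitOn cell.toList ['\n']
  cell_lines.foldl (fun maxi line =>
    let parts := PySem.Chars.splitOn line ['\t']
    let length := (List.zip parts (PySem.List.pyRange 1 (PySem.List.len parts + 1) 1)).foldl
      (fun length pi =>
        let length := length + PySem.List.len pi.1
        if pi.2 < PySem.List.len parts then (PySem.Int.floordiv length 8 + 1) * 8 else length) 0
    max maxi length) 0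

-- ===== PORT B =====
-- transliteration of B: one pass over the characters with state (maxi, col)
def len_cell_py_alt (cell : String) : Int :=
  let s := cell.toList.foldl (fun (s : Int × Int) ch =>
    if ch = '\n' then (if s.2 > s.1 then (s.2, 0) else (s.1, 0))
    else if ch = '\t' then (s.1, (PySem.Int.floordiv s.2 8 + 1) * 8)
    else (s.1, s.2 + 1)) (0, 0)
  max s.1 s.2

-- ===== PRECONDITION & SPEC =====
def Spec_len_cell_py (cell : String) (out : Int) : Prop := out = len_cell_py_alt cell
instance (cell : String) (out : Int) : Decidable (Spec_len_cell_py cell out) := by unfold Spec_len_cell_py; infer_instance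

-- ===== CLAIM (what is proved, stated in full; the proofs are below) =====
def Claim_equal_len_cell_py : Prop := ∀ (cell : String), Dom_len_cell_py cell → Spec_len_cell_py cell (len_cell_py cell)

-- ===== LEMMAS AND PROOFS =====

-- simple recursive one-character splitter, proved equal to PySem.Chars.splitOn · [s]
def splitChar (s : Char) : List Char → List (List Char)
  | [] => [[]]
  | c :: r =>
    if c = s then [] :: splitChar s r
    else
      match splitChar s r with
      | [] => [[c]]
      | h :: t => (c :: h) :: t

lemma splitChar_ne_nil (s : Char) (l : List Char) : splitChar s l ≠ [] := by
  induction l with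
  | nil => simp [splitChar]
  | cons c r ih =>
    simp only [splitChar]
    split_ifs
    · simp
    · cases h : splitChar s r <;> simp

lemma splitOn_go_eq (s : Char) (fuel : Nat) :
    ∀ (l cur : List Char) (accs : List (List Char)), l.length ≤ fuel →
      PySem.Chars.splitOn.go [s] fuel l cur accs =
        accs.reverse ++ (splitChar s l).modifyHead (cur.reverse ++ ·) := by
  induction fuel with
  | zero =>
    intro l cur accs hl
    have : l = [] := by cases l <;> simp_all
    subst this
    simp [PySem.Chars.splitOn.go, splitChar]
  | succ fuel ih =>
    intro l cur accs hl
    cases l with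
    | nil => simp [PySem.Chars.splitOn.go, splitChar]
    | cons c rest =>
      simp only [PySem.Chars.splitOn.go]
      by_cases hc : c = s
      · subst hc
        simp only [List.isPrefixOf_iff_prefix, List.cons_prefix_cons, List.nil_prefix, and_true,
          List.length_cons, List.drop_succ_cons, List.length_nil, List.drop_zero, if_true]
        rw [ih rest [] _ (by simpa using hl)]
        have h1 : splitChar c (c :: rest) = [] :: splitChar c rest := by simp [splitChar]
        rw [h1]
        cases h : splitChar c rest with
        | nil => exact absurd h (splitChar_ne_nil c rest)
        | cons a t => simp
      · have hpre : ¬ ([s].isPrefixOf (c :: rest) = true) := by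
          simp [List.isPrefixOf_iff_prefix, List.cons_prefix_cons]
          intro h; exact hc h.symm
        rw [if_neg hpre]
        rw [ih rest (c :: cur) accs (by simpa using hl)]
        have h1 : splitChar s (c :: rest) =
            match splitChar s rest with
            | [] => [[c]]
            | h :: t => (c :: h) :: t := by simp [splitChar, hc]
        cases h : splitChar s rest with
        | nil => exact absurd h (splitChar_ne_nil s rest)
        | cons a t => rw [h1, h]; simp

lemma splitOn_eq_splitChar (s : Char) (l : List Char) :
    PySem.Chars.splitOn l [s] = splitChar s l := by
  rw [PySem.Chars.splitOn, splitOn_go_eq s (l.length+1) l [] [] (by omega)]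
  cases h : splitChar s l with
  | nil => exact absurd h (splitChar_ne_nil s l)
  | cons a t => simp

lemma mem_splitChar_not_mem (s : Char) (l : List Char) :
    ∀ p ∈ splitChar s l, s ∉ p := by
  induction l with
  | nil => simp [splitChar]
  | cons c r ih =>
    intro p hp
    simp only [splitChar] at hp
    by_cases hc : c = s
    · rw [if_pos hc] at hp
      rcases List.mem_cons.mp hp with h | h
      · subst h; simp
      · exact ih p h
    · rw [if_neg hc] at hp
      obtain ⟨a, t, h⟩ : ∃ a t, splitChar s r = a :: t := by
        cases h : splitChar s r with
        | nil => exact absurd h (splitChar_ne_nil s r)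
        | cons a t => exact ⟨a, t, rfl⟩
      rw [h] at hp
      rcases List.mem_cons.mp hp with hh | hh
      · subst hh
        intro hmem
        rcases List.mem_cons.mp hmem with h1 | h1
        · exact hc h1.symm
        · exact ih a (h ▸ List.mem_cons_self ..) h1
      · exact ih p (h ▸ List.mem_cons_of_mem a hh)

-- B's per-character column update and the recursive width function both ports are reduced to
def colStep (c : Int) (ch : Char) : Int :=
  if ch = '\t' then (PySem.Int.floordiv c 8 + 1) * 8 else c + 1

def colFold (l : List Char) (c : Int) : Int := l.foldl colStep c

def width (maxi col : Int) : List Char → Int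
  | [] => max maxi col
  | ch :: r =>
    if ch = '\n' then width (max maxi col) 0 r
    else width maxi (colStep col ch) r

-- A's zip-index fold rewritten as a plain recursion over the parts ("tab stop after every part but the last")
def gParts (acc : Int) : List (List Char) → Int
  | [] => acc
  | [p] => acc + PySem.List.len p
  | p :: q :: r => gParts ((PySem.Int.floordiv (acc + PySem.List.len p) 8 + 1) * 8) (q :: r)

lemma zipFold_eq_gParts (N : Int) :
    ∀ (ps : List (List Char)) (k acc : Int), k + ps.length = N + 1 →
      (List.zip ps (PySem.List.pyRange k (N + 1) 1)).foldl
        (fun length pi =>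
          let length := length + PySem.List.len pi.1
          if pi.2 < N then (PySem.Int.floordiv length 8 + 1) * 8 else length) acc
      = gParts acc ps := by
  intro ps
  induction ps with
  | nil => intro k acc h; simp [gParts]
  | cons p rest ih =>
    intro k acc h
    have hk : k < N + 1 := by simp at h; omega
    rw [PySem.List.pyRange_one_cons hk]
    simp only [List.zip_cons_cons, List.foldl_cons]
    cases rest with
    | nil =>
      have : ¬ (k < N) := by simp at h; omega
      simp [this, gParts]
    | cons q r =>
      have hlt : k < N := by simp at h; omega
      simp only [hlt, if_pos, gParts]
      exact ih (k+1) _ (by simp at h ⊢; omega)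

lemma gParts_cons_head (c : Char) (h : List Char) (t : List (List Char)) (acc : Int) :
    gParts acc ((c :: h) :: t) = gParts (acc + 1) (h :: t) := by
  cases t with
  | nil => simp [gParts, PySem.List.len]; ring
  | cons q r =>
    simp only [gParts]
    congr 1
    simp [PySem.List.len]; ring_nf

lemma gParts_splitChar_tab (l : List Char) (hn : ('\n' : Char) ∉ l) :
    ∀ acc : Int, gParts acc (splitChar '\t' l) = colFold l acc := by
  induction l with
  | nil => intro acc; simp [splitChar, gParts, colFold, PySem.List.len]
  | cons c r ih =>
    intro acc
    have hn' : ('\n' : Char) ∉ r := fun h => hn (List.mem_cons_of_mem c h)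
    obtain ⟨a, t, hs⟩ : ∃ a t, splitChar '\t' r = a :: t := by
      cases hx : splitChar '\t' r with
      | nil => exact absurd hx (splitChar_ne_nil _ r)
      | cons a t => exact ⟨a, t, rfl⟩
    by_cases hc : c = '\t'
    · subst hc
      have : splitChar '\t' ('\t' :: r) = [] :: splitChar '\t' r := by simp [splitChar]
      rw [this, hs]
      have h2 := ih hn' ((PySem.Int.floordiv acc 8 + 1) * 8)
      rw [hs] at h2
      rw [show gParts acc ([] :: a :: t) = gParts ((PySem.Int.floordiv acc 8 + 1) * 8) (a :: t) by
        simp [gParts, PySem.List.len], h2]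
      simp [colFold, colStep]
    · have : splitChar '\t' (c :: r) = (c :: a) :: t := by simp [splitChar, hc, hs]
      have h2 := ih hn' (acc + 1)
      rw [hs] at h2
      rw [this, gParts_cons_head, h2]
      simp [colFold, colStep, hc]

lemma foldB_eq_width (l : List Char) :
    ∀ (m c : Int),
      (let s := l.foldl (fun (s : Int × Int) ch =>
        if ch = '\n' then (if s.2 > s.1 then (s.2, 0) else (s.1, 0))
        else if ch = '\t' then (s.1, (PySem.Int.floordiv s.2 8 + 1) * 8)
        else (s.1, s.2 + 1)) (m, c)
      max s.1 s.2) = width m c l := by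
  induction l with
  | nil => intro m c; simp [width]
  | cons ch r ih =>
    intro m c
    simp only [List.foldl_cons, width]
    by_cases h1 : ch = '\n'
    · subst h1
      rw [if_pos rfl]
      by_cases h2 : c > m
      · rw [if_pos h2, ih]
        congr 1
        omega
      · rw [if_neg h2, ih]
        congr 1
        omega
    · by_cases h2 : ch = '\t'
      · subst h2
        rw [if_neg h1, if_pos rfl, ih]
        simp [colStep]
      · rw [if_neg h1, if_neg h2, ih]
        simp [colStep, h2, h1]

lemma width_eq_lines (l : List Char) :
    ∀ (m c : Int) (h : List Char) (t : List (List Char)),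
      splitChar '\n' l = h :: t →
      width m c l = t.foldl (fun m p => max m (colFold p 0)) (max m (colFold h c)) := by
  induction l with
  | nil =>
    intro m c h t hs
    simp [splitChar] at hs
    obtain ⟨h1, h2⟩ := hs
    subst h1; subst h2
    simp [width, colFold]
  | cons ch r ih =>
    intro m c h t hs
    obtain ⟨a, ts, hr⟩ : ∃ a ts, splitChar '\n' r = a :: ts := by
      cases hx : splitChar '\n' r with
      | nil => exact absurd hx (splitChar_ne_nil _ r)
      | cons a ts => exact ⟨a, ts, rfl⟩
    by_cases hc : ch = '\n'
    · subst hc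
      have : splitChar '\n' ('\n' :: r) = [] :: splitChar '\n' r := by simp [splitChar]
      rw [this, hr] at hs
      obtain ⟨h1, h2⟩ := List.cons_eq_cons.mp hs
      subst h1; subst h2
      rw [show width m c ('\n'::r) = width (max m c) 0 r by simp [width]]
      rw [ih (max m c) 0 a ts hr]
      simp [colFold]
    · have : splitChar '\n' (ch :: r) = (ch :: a) :: ts := by simp [splitChar, hc, hr]
      rw [this] at hs
      obtain ⟨h1, h2⟩ := List.cons_eq_cons.mp hs
      subst h1; subst h2
      rw [show width m c (ch::r) = width m (colStep c ch) r by simp [width, hc]]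
      rw [ih m (colStep c ch) a ts hr]
      simp [colFold]

-- A's per-line computation equals the charwise column fold, for a line without '\n'
lemma lineW_eq_colFold (line : List Char) (hn : ('\n' : Char) ∉ line) :
    (List.zip (PySem.Chars.splitOn line ['\t'])
        (PySem.List.pyRange 1 (PySem.List.len (PySem.Chars.splitOn line ['\t']) + 1) 1)).foldl
      (fun length pi =>
        let length := length + PySem.List.len pi.1
        if pi.2 < PySem.List.len (PySem.Chars.splitOn line ['\t']) then
          (PySem.Int.floordiv length 8 + 1) * 8 else length) 0
    = colFold line 0 := by
  rw [splitOn_eq_splitChar]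
  rw [zipFold_eq_gParts (PySem.List.len (splitChar '\t' line)) (splitChar '\t' line) 1 0
    (by simp [PySem.List.len]; ring)]
  exact gParts_splitChar_tab line hn 0

-- ===== VERDICT (by name: the statement is the Claim_ definition above) =====
theorem len_cell_py_spec : Claim_equal_len_cell_py := by
  intro cell _
  unfold Spec_len_cell_py len_cell_py len_cell_py_alt
  simp only
  rw [foldB_eq_width]
  rw [splitOn_eq_splitChar]
  obtain ⟨h, t, hs⟩ : ∃ h t, splitChar '\n' cell.toList = h :: t := by
    cases hx : splitChar '\n' cell.toList with
    | nil => exact absurd hx (splitChar_ne_nil _ _)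
    | cons a ts => exact ⟨a, ts, rfl⟩
  rw [hs, width_eq_lines cell.toList 0 0 h t hs]
  have hmem : ∀ p ∈ h :: t, ('\n' : Char) ∉ p := by
    intro p hp
    exact mem_splitChar_not_mem '\n' cell.toList p (hs ▸ hp)
  simp only [List.foldl_cons]
  rw [lineW_eq_colFold h (hmem h (List.mem_cons_self ..))]
  apply PySem.List.foldl_congr_mem
  intro acc x hx
  rw [lineW_eq_colFold x (hmem x (List.mem_cons_of_mem h hx))]
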